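-- pv_equiv track=rewrite | github.com/synsense/rockpool | rockpool/nn/modules/native/analogFrontEnd.py | sampling_signal
-- ===== SOURCE A (Python) =====
-- def sampling_signal(ch1, count):
--
--     sam_count = 1
--     sampled = []
--
--     for i in range(len(ch1)):
--         if (ch1[i] == 1) & (sam_count < count):
--             sam_count = sam_count + 1
--             sampled.append(0)
--         elif (ch1[i] == 1) & (sam_count == count):
--             sam_count = 1
--             sampled.append(1)
--         else:
--             sampled.append(0)
--
--     return sampled
-- ===== SOURCE B (Python) =====
-- def sampling_signal(ch1, count):
--     # Two-pass: collect the indices of the 1s, mark those whose 1-based rank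
--     # is a multiple of count, then build the output by membership.
--     if count < 1:
--         return [0] * len(ch1)
--     positions = [i for i, v in enumerate(ch1) if v == 1]
--     marked = {p for j, p in enumerate(positions) if (j + 1) % count == 0}
--     return [1 if i in marked else 0 for i in range(len(ch1))]
-- ===== Notes on version B (the rewrite author's own statement) =====
-- stated objective: idiomatic
-- what changed: Replaces the stateful saturating-counter scan with a two-pass pipeline: collect the indices of the 1s, mark every count-th one by rank modulo count via a set, and build the output by membership.
import Mathlib
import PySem

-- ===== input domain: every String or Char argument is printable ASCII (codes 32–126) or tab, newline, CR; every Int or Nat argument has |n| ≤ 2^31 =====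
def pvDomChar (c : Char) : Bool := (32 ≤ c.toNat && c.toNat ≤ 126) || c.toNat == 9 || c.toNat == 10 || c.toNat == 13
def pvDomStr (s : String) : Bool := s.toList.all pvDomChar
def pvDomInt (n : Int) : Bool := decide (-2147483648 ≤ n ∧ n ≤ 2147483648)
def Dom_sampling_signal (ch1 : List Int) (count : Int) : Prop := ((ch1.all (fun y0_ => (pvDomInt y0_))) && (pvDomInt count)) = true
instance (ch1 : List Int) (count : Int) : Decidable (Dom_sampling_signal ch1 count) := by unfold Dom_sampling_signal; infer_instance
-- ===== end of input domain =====

-- B replaces A's stateful saturating-counter scan by a two-pass pipeline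
-- (collect indices of 1s, mark every count-th by rank, rebuild by membership);
-- objective: a more idiomatic decomposition, same return value.

-- ===== PORT A =====
-- literal transliteration of A's loop: state (sam_count, sampled), appends at the end
def sampling_signal (ch1 : List Int) (count : Int) : List Int :=
  (ch1.foldl
    (fun (st : Int × List Int) v =>
      if v = 1 ∧ st.1 < count then (st.1 + 1, st.2 ++ [(0 : Int)])
      else if v = 1 ∧ st.1 = count then ((1 : Int), st.2 ++ [(1 : Int)])
      else (st.1, st.2 ++ [(0 : Int)]))
    ((1 : Int), ([] : List Int))).2

-- ===== PORT B =====
def sampling_signal_alt (ch1 : List Int) (count : Int) : List Int :=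
  if count < 1 then List.replicate ch1.length 0
  else
    let positions : List Int :=
      ((PySem.List.enumerate ch1 0).filter (fun p => p.2 == 1)).map (fun p => p.1)
    let marked : PySem.Set Int :=
      PySem.Set.ofList (((PySem.List.enumerate positions 0).filter
        (fun q => PySem.Int.mod (q.1 + 1) count == 0)).map (fun q => q.2))
    (PySem.List.pyRange 0 (ch1.length : Int) 1).map
      (fun i => if PySem.Set.contains marked i then (1 : Int) else 0)

-- ===== PRECONDITION & SPEC =====
def Spec_sampling_signal (ch1 : List Int) (count : Int) (out : List Int) : Prop := out = sampling_signal_alt ch1 count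
instance (ch1 : List Int) (count : Int) (out : List Int) : Decidable (Spec_sampling_signal ch1 count out) := by unfold Spec_sampling_signal; infer_instance

-- ===== CLAIM (what is proved, stated in full; the proofs are below) =====
def Claim_equal_sampling_signal : Prop := ∀ (ch1 : List Int) (count : Int), Dom_sampling_signal ch1 count → Spec_sampling_signal ch1 count (sampling_signal ch1 count)

-- ===== LEMMAS AND PROOFS =====

-- A's loop as a structural recursion (sam_count as first argument)
def goSS (count c : Int) : List Int → List Int
  | [] => []
  | v :: rest =>
    if v = 1 ∧ c < count then 0 :: goSS count (c + 1) rest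
    else if v = 1 ∧ c = count then 1 :: goSS count 1 rest
    else 0 :: goSS count c rest

-- rank-modulo form: r = number of 1s already consumed
def mkSS (count r : Int) : List Int → List Int
  | [] => []
  | v :: rest =>
    if v = 1 then (if (r + 1) % count = 0 then 1 else 0) :: mkSS count (r + 1) rest
    else 0 :: mkSS count r rest

theorem foldA (count : Int) (l : List Int) (c : Int) (acc : List Int) :
    (l.foldl
      (fun (st : Int × List Int) v =>
        if v = 1 ∧ st.1 < count then (st.1 + 1, st.2 ++ [(0 : Int)])
        else if v = 1 ∧ st.1 = count then ((1 : Int), st.2 ++ [(1 : Int)])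
        else (st.1, st.2 ++ [(0 : Int)]))
      (c, acc)).2 = acc ++ goSS count c l := by
  induction l generalizing c acc with
  | nil => simp [goSS]
  | cons v rest ih =>
      simp only [List.foldl_cons, goSS]
      split_ifs with h1 h2 <;> simp [ih]

theorem A_eq_go (ch1 : List Int) (count : Int) :
    sampling_signal ch1 count = goSS count 1 ch1 := by
  unfold sampling_signal
  simpa using foldA count ch1 1 []

theorem mk_shift (count : Int) (l : List Int) : ∀ r, mkSS count (r + count) l = mkSS count r l := by
  induction l with
  | nil => intro r; rfl
  | cons v rest ih =>
      intro r
      by_cases hv : v = 1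
      · have hsh : r + count + 1 = r + 1 + count := by ring
        have hmod : (r + 1 + count) % count = (r + 1) % count := by
          have h : r + 1 + count = r + 1 + count * 1 := by ring
          rw [h, Int.add_mul_emod_self_left]
        simp [mkSS, hv, hsh, hmod, ih (r + 1)]
      · simp [mkSS, hv, ih r]

theorem go_eq_mk (count : Int) (hc : 1 ≤ count) :
    ∀ (l : List Int) (c : Int), 1 ≤ c → c ≤ count → goSS count c l = mkSS count (c - 1) l := by
  intro l
  induction l with
  | nil => intro c _ _; rfl
  | cons v rest ih =>
      intro c h1 h2
      by_cases hv : v = 1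
      · by_cases hlt : c < count
        · have e1 : goSS count c (v :: rest) = 0 :: goSS count (c + 1) rest := by
            simp [goSS, hv, hlt]
          have hc0 : ¬ ((c - 1 + 1) % count = 0) := by
            rw [show c - 1 + 1 = c from by ring, Int.emod_eq_of_lt (by omega) hlt]; omega
          have hnd : ¬ (count ∣ c) := fun hd => absurd (Int.le_of_dvd (by omega) hd) (by omega)
          have e2 : mkSS count (c - 1) (v :: rest) = 0 :: mkSS count c rest := by
            simp [mkSS, hv, show c - 1 + 1 = c from by ring, hnd]
          rw [e1, e2, ih (c + 1) (by omega) (by omega), show c + 1 - 1 = c from by ring]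
        · have hceq : c = count := by omega
          subst hceq
          have e1 : goSS c c (v :: rest) = 1 :: goSS c 1 rest := by
            simp [goSS, hv]
          have ht : mkSS c c rest = mkSS c 0 rest := by
            simpa using mk_shift c rest 0
          have e2 : mkSS c (c - 1) (v :: rest) = 1 :: mkSS c 0 rest := by
            simp [mkSS, hv, ht]
          have hgo : goSS c 1 rest = mkSS c 0 rest := by
            simpa using ih 1 le_rfl hc
          rw [e1, e2, hgo]
      · simp [goSS, mkSS, hv, ih c h1 h2]

theorem go_small (count : Int) (hc : count < 1) :
    ∀ l : List Int, goSS count 1 l = List.replicate l.length 0 := by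
  intro l
  induction l with
  | nil => rfl
  | cons v rest ih =>
      have h1 : ¬ (v = 1 ∧ (1 : Int) < count) := by rintro ⟨_, h⟩; omega
      have h2 : ¬ (v = 1 ∧ (1 : Int) = count) := by rintro ⟨_, h⟩; omega
      simp [goSS, h1, h2, ih, List.replicate_succ]

theorem mk_length (count r : Int) (l : List Int) : (mkSS count r l).length = l.length := by
  induction l generalizing r with
  | nil => rfl
  | cons v rest ih => by_cases hv : v = 1 <;> simp [mkSS, hv, ih]

theorem mk_get (count : Int) (l : List Int) :
    ∀ (r : Int) (i : Nat) (h : i < l.length),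
      (mkSS count r l)[i]'(by rw [mk_length]; exact h) =
        if l[i] = 1 ∧ (r + ((l.take (i + 1)).count 1 : Int)) % count = 0 then 1 else 0 := by
  induction l with
  | nil => intro r i h; simp at h
  | cons v rest ih =>
      intro r i h
      cases i with
      | zero => by_cases hv : v = 1 <;> simp [mkSS, hv]
      | succ i =>
          have hi : i < rest.length := by simpa using h
          by_cases hv : v = 1
          · have hunf : mkSS count r (v :: rest)
                = (if (r + 1) % count = 0 then (1 : Int) else 0) :: mkSS count (r + 1) rest := by
              simp [mkSS, hv]
            simp only [hunf, List.getElem_cons_succ]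
            rw [ih (r + 1) i hi]
            simp only [List.take_succ_cons, List.count_cons, hv, beq_self_eq_true, if_true]
            push_cast
            ring_nf
          · have hunf : mkSS count r (v :: rest) = 0 :: mkSS count r rest := by
              simp [mkSS, hv]
            simp only [hunf, List.getElem_cons_succ]
            rw [ih r i hi]
            simp [List.take_succ_cons, hv]

-- positions list with a generalized enumerate start
def posS (l : List Int) (s : Int) : List Int :=
  ((PySem.List.enumerate l s).filter (fun p => p.2 == 1)).map (fun p => p.1)

theorem posS_cons (v : Int) (rest : List Int) (s : Int) :
    posS (v :: rest) s = (if v = 1 then [s] else []) ++ posS rest (s + 1) := by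
  by_cases hv : v = 1 <;> simp [posS, PySem.List.enumerate_cons, hv]

-- every element of posS is the position of a 1, with rank = index + 1
theorem posS_get (l : List Int) :
    ∀ (s : Int) (k : Nat) (hk : k < (posS l s).length),
      ∃ (j : Nat) (hj : j < l.length),
        (posS l s)[k] = s + (j : Int) ∧ l[j] = 1 ∧ (l.take (j + 1)).count 1 = k + 1 := by
  induction l with
  | nil => intro s k hk; simp [posS, PySem.List.enumerate_nil] at hk
  | cons v rest ih =>
      intro s k hk
      by_cases hv : v = 1
      · simp only [posS_cons, if_pos hv] at hk ⊢
        cases k with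
        | zero =>
            exact ⟨0, by simp, by simp, by simpa using hv, by simp [hv]⟩
        | succ k =>
            have hk' : k < (posS rest (s + 1)).length := by simpa using hk
            obtain ⟨j, hj, he, h1, hc⟩ := ih (s + 1) k hk'
            refine ⟨j + 1, by simpa using hj, ?_, by simpa using h1, ?_⟩
            · simp only [List.singleton_append, List.getElem_cons_succ, he]; push_cast; ring
            · simp [hv, hc]
      · simp only [posS_cons, if_neg hv] at hk ⊢
        have hk' : k < (posS rest (s + 1)).length := by simpa using hk
        obtain ⟨j, hj, he, h1, hc⟩ := ih (s + 1) k hk'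
        refine ⟨j + 1, by simpa using hj, ?_, by simpa using h1, ?_⟩
        · simp only [List.nil_append, he]; push_cast; ring
        · simp [hv, hc]

-- every 1 occurs in posS, at index rank - 1
theorem posS_mem (l : List Int) :
    ∀ (s : Int) (j : Nat) (hj : j < l.length), l[j] = 1 →
      ∃ (k : Nat) (hk : k < (posS l s).length),
        (posS l s)[k] = s + (j : Int) ∧ (l.take (j + 1)).count 1 = k + 1 := by
  induction l with
  | nil => intro s j hj; simp at hj
  | cons v rest ih =>
      intro s j hj h1
      cases j with
      | zero =>
          have hv : v = 1 := by simpa using h1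
          refine ⟨0, ?_, ?_, ?_⟩ <;> simp [posS_cons, hv]
      | succ j =>
          have hj' : j < rest.length := by simpa using hj
          have h1' : rest[j] = 1 := by simpa using h1
          obtain ⟨k, hk, he, hc⟩ := ih (s + 1) j hj' h1'
          by_cases hv : v = 1
          · refine ⟨k + 1, ?_, ?_, ?_⟩
            · simp [posS_cons, hv]; omega
            · simp only [posS_cons, if_pos hv, List.singleton_append,
                List.getElem_cons_succ, he]; push_cast; ring
            · simp [hv, hc]
          · refine ⟨k, ?_, ?_, ?_⟩
            · simpa [posS_cons, hv] using hk
            · simp only [posS_cons, if_neg hv, List.nil_append, he]; push_cast; ring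
            · simp [hv, hc]

-- membership in B's marked set, for count ≥ 1
theorem marked_mem (ch1 : List Int) (count : Int) (hc : 1 ≤ count) (i : Nat) (hi : i < ch1.length) :
    ((i : Int) ∈ (((PySem.List.enumerate (posS ch1 0) 0).filter
        (fun q => PySem.Int.mod (q.1 + 1) count == 0)).map (fun q => q.2)))
      ↔ (ch1[i] = 1 ∧ ((ch1.take (i + 1)).count 1 : Int) % count = 0) := by
  constructor
  · intro hm
    simp only [List.mem_map, List.mem_filter] at hm
    obtain ⟨q, ⟨hqe, hqc⟩, hq2⟩ := hm
    rw [PySem.List.mem_enumerate_iff] at hqe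
    obtain ⟨k, hk, rfl⟩ := hqe
    simp only at hq2 hqc
    obtain ⟨j, hj, he, h1, hcnt⟩ := posS_get ch1 0 k hk
    rw [he] at hq2
    have hji : j = i := by
      have : (j : Int) = (i : Int) := by omega
      exact_mod_cast this
    subst hji
    refine ⟨h1, ?_⟩
    have hmod := PySem.Int.mod_eq_emod_of_pos (a := (0 : Int) + (k : Int) + 1) (by omega : (0:Int) < count)
    rw [hmod] at hqc
    have : ((0 : Int) + (k : Int) + 1) % count = 0 := by simpa using hqc
    rw [hcnt]; push_cast at this ⊢; convert this using 2; ring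
  · rintro ⟨h1, hmod⟩
    obtain ⟨k, hk, he, hcnt⟩ := posS_mem ch1 0 i hi h1
    simp only [List.mem_map, List.mem_filter]
    refine ⟨((0 : Int) + (k : Int), (posS ch1 0)[k]), ⟨?_, ?_⟩, ?_⟩
    · rw [PySem.List.mem_enumerate_iff]; exact ⟨k, hk, rfl⟩
    · simp only
      rw [PySem.Int.mod_eq_emod_of_pos (by omega : (0:Int) < count)]
      have : ((ch1.take (i + 1)).count 1 : Int) = (k : Int) + 1 := by
        rw [hcnt]; push_cast; ring
      rw [this] at hmod
      simp only [beq_iff_eq]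
      convert hmod using 2; ring
    · simp [he]

-- ===== VERDICT (by name: the statement is the Claim_ definition above) =====
theorem sampling_signal_spec : Claim_equal_sampling_signal := by
  intro ch1 count _
  unfold Spec_sampling_signal
  rw [A_eq_go]
  by_cases hc : count < 1
  · rw [go_small count hc]
    unfold sampling_signal_alt
    rw [if_pos hc]
  · replace hc : 1 ≤ count := by omega
    rw [go_eq_mk count hc ch1 1 le_rfl hc]
    unfold sampling_signal_alt
    rw [if_neg (by omega)]
    simp only
    apply List.ext_getElem
    · simp [mk_length, PySem.List.length_pyRange_one]
    · intro i hi hi2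
      have hin : i < ch1.length := by rwa [mk_length] at hi
      rw [List.getElem_map, PySem.List.getElem_pyRange_one, mk_get count ch1 (1 - 1) i hin,
        show (1 : Int) - 1 = 0 from by norm_num]
      simp only [zero_add]
      have hmm := marked_mem ch1 count hc i hin
      by_cases hcase : ch1[i] = 1 ∧ ((ch1.take (i + 1)).count 1 : Int) % count = 0
      · rw [if_pos hcase,
          if_pos (by simpa [posS, PySem.Set.contains_iff, PySem.Set.mem_ofList]
            using hmm.mpr hcase)]
      · rw [if_neg hcase,
          if_neg (fun hcon => hcase (hmm.mp
            (by simpa [posS, PySem.Set.contains_iff, PySem.Set.mem_ofList] using hcon)))]
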